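-- pv_equiv track=rewrite | github.com/KSH23/algorithm_practice | Programmers/60058.py | solution
-- ===== SOURCE A (Python) =====
-- def good_bracket(string):
--     stack = []
--     for letter in string:
--         # 스택이 비어있는 경우
--         if not stack:
--             # 우측 괄호가 들어오면 올바른 괄호 문자열 아님
--             if letter == ")":
--                 return False
--             stack.append(letter)
--
--         # 좌측 괄호는 스택에 추가
--         elif letter == "(":
--             stack.append(letter)
--
--         # 스택에 괄호가 있는데 우측 괄호가 등장한 경우
--         else:
--             # 스택의 마지막 문자(좌측 괄호) 한 개 제거
--             stack.pop()
--
--     # 스택에 괄호가 남은 경우 올바른 괄호 문자열 아님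
--     if stack:
--         return False
--
--     return True
--
-- def solution(w):
--     # 1. 입력이 빈 문자열인 경우, 빈 문자열을 반환합니다.
--     if not w:
--         return w
--
--     # 2. 문자열 w를 두 "균형잡힌 괄호 문자열" u, v로 분리합니다.
--     # 단, u는 "균형잡힌 괄호 문자열"로 더 이상 분리할 수 없어야 하며, v는 빈 문자열이 될 수 있습니다.
--     u, v = "", ""
--     bracket_cnt_dict = {"(": 0, ")": 0}  # 괄호 개수 저장 딕셔너리
--     for idx, letter in enumerate(w):
--         bracket_cnt_dict[letter] += 1
--
--         # 균형잡힌 괄호 문자열을 생성한 경우 해당 인덱스로 u와 v 문자열을 나눔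
--         if bracket_cnt_dict["("] == bracket_cnt_dict[")"]:
--             u, v = w[0: idx + 1], w[idx + 1:]
--             break
--
--     # 3. 문자열 u가 "올바른 괄호 문자열" 이라면 문자열 v에 대해 1단계부터 다시 수행합니다.
--     if good_bracket(u):
--         # 3-1. 수행한 결과 문자열을 u에 이어 붙인 후 반환합니다.
--         return u + solution(v)
--
--     # 4. 문자열 u가 "올바른 괄호 문자열"이 아니라면 아래 과정을 수행합니다.
--     else:
--         #  4-1. 빈 문자열에 첫 번째 문자로 '('를 붙입니다.
--         #  4-2. 문자열 v에 대해 1단계부터 재귀적으로 수행한 결과 문자열을 이어 붙입니다.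
--         #  4-3. ')'를 다시 붙입니다.
--         #  4-4. u의 첫 번째와 마지막 문자를 제거하고, 나머지 문자열의 괄호 방향을 뒤집어서 뒤에 붙입니다.
--         #  4-5. 생성된 문자열을 반환합니다.
--         return "(" + solution(v) + ")" + u[1: -1].replace("(", "a").replace(")", "(").replace("a", ")")
-- ===== SOURCE B (Python) =====
-- def solution(w):
--     # cut w into consecutive minimal balanced chunks with a running balance
--     delta = {'(': 1, ')': -1}
--     chunks = []
--     bal = 0
--     start = 0
--     for i, ch in enumerate(w):
--         bal += delta[ch]
--         if bal == 0:
--             chunks.append(w[start:i + 1])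
--             start = i + 1
--     # fold the chunk list from right to left; a minimal chunk is correct
--     # iff it starts with '('
--     res = ""
--     for c in reversed(chunks):
--         if c[0] == '(':
--             res = c + res
--         else:
--             res = "(" + res + ")" + "".join('(' if x == ')' else ')' for x in c[1:-1])
--     return res
-- ===== Notes on version B (the rewrite author's own statement) =====
-- stated objective: simpler
-- what changed: A's recursive split-off-one-chunk-then-recurse with a stack-based correctness check is replaced by a two-phase shape: one running-balance scan cuts w into its list of minimal balanced chunks, then a right-to-left fold over that list assembles the result, deciding each chunk's correctness by its first character alone.
import Mathlib
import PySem

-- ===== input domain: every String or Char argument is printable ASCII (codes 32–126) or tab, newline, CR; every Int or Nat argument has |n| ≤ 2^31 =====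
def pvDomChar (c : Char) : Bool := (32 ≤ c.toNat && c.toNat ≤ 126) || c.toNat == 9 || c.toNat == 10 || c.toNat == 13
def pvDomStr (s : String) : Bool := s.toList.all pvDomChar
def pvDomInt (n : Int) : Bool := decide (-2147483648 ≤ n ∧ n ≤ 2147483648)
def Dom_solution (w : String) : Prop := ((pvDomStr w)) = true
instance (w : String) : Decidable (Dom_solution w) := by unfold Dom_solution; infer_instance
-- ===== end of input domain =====

-- B replaces A's recursive split-and-recurse (with its stack-based correctness check)
-- by a two-phase shape: one balance scan cutting w into minimal balanced chunks, then a
-- right-to-left fold over the chunk list, testing a chunk by its first character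
-- (objective: simpler).

-- ===== PORT A =====
-- good_bracket: the stack loop, transliterated (append at the end, pop = dropLast)
def gbLoop (stack : List Char) (cs : List Char) : Bool :=
  match cs with
  | [] => stack.isEmpty
  | letter :: rest =>
    if stack.isEmpty then
      if letter == ')' then false else gbLoop (stack ++ [letter]) rest
    else if letter == '(' then gbLoop (stack ++ [letter]) rest
    else gbLoop stack.dropLast rest

def good_bracket (s : List Char) : Bool := gbLoop [] s

-- u[1:-1].replace("(","a").replace(")","(").replace("a",")") : three single-char replaces = three maps
def flipA (s : List Char) : List Char :=
  ((s.map (fun c => if c == '(' then 'a' else c)).map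
      (fun c => if c == ')' then '(' else c)).map
      (fun c => if c == 'a' then ')' else c)

-- step 2's enumerate loop: (relative) index of the first position where the
-- '(' count equals the ')' count, counters carried exactly as the dict does
def findSplit (cs : List Char) (op cl : Int) : Option Nat :=
  match cs with
  | [] => none
  | letter :: rest =>
    let op' := if letter == '(' then op + 1 else op
    let cl' := if letter == ')' then cl + 1 else cl
    if op' == cl' then some 0 else (findSplit rest op' cl').map (· + 1)

theorem findSplit_lt (cs : List Char) (op cl : Int) (j : Nat)
    (h : findSplit cs op cl = some j) : j < cs.length := by
  induction cs generalizing op cl j with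
  | nil => simp [findSplit] at h
  | cons c rest ih =>
    simp only [findSplit] at h
    by_cases ht : ((if c == '(' then op + 1 else op) == (if c == ')' then cl + 1 else cl)) = true
    · rw [if_pos ht] at h
      cases h
      simp
    · rw [if_neg ht] at h
      rcases Option.map_eq_some_iff.mp h with ⟨j', hj', rfl⟩
      have := ih _ _ _ hj'
      simp only [List.length_cons]; omega

def solAList (cs : List Char) : List Char :=
  if cs.isEmpty then cs
  else
    match hfs : findSplit cs 0 0 with
    | none =>
      -- loop found no split: u and v keep their initial value ""
      if good_bracket [] then [] ++ solAList []
      else '(' :: (solAList [] ++ ')' :: flipA ((List.drop 1 ([] : List Char)).dropLast))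
    | some j =>
      if good_bracket (cs.take (j + 1)) then cs.take (j + 1) ++ solAList (cs.drop (j + 1))
      else '(' :: (solAList (cs.drop (j + 1)) ++ ')' :: flipA (((cs.take (j + 1)).drop 1).dropLast))
termination_by cs.length
decreasing_by
  all_goals
    first
      | simp_all [List.isEmpty_iff, List.length_pos_iff]
      | (have := findSplit_lt cs 0 0 j hfs; simp only [List.length_drop]; omega)

def solution (w : String) : String := String.ofList (solAList w.toList)

-- ===== PORT B =====
def flipB (s : List Char) : List Char := s.map (fun x => if x == ')' then '(' else ')')

-- phase 1: cut into consecutive minimal balanced chunks (unbalanced tail dropped);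
-- Source B's delta-dict lookup {'(': 1, ')': -1}[ch] is ported as the if-else delta,
-- exact on Pre_'s bracket-only strings (outside them that lookup raises KeyError)
def chunksGo (cs : List Char) (buf : List Char) (bal : Int) : List (List Char) :=
  match cs with
  | [] => []
  | ch :: rest =>
    let buf' := buf ++ [ch]
    let bal' := bal + (if ch == '(' then 1 else -1)
    if bal' == 0 then buf' :: chunksGo rest [] 0 else chunksGo rest buf' bal'

-- phase 2: one step of the right-to-left fold over the chunk list
def stepB (c : List Char) (res : List Char) : List Char :=
  if c.headD ' ' == '(' then c ++ res
  else '(' :: (res ++ ')' :: flipB ((c.drop 1).dropLast))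

def solution_alt (w : String) : String :=
  String.ofList ((chunksGo w.toList [] 0).foldr stepB [])

-- ===== PRECONDITION & SPEC =====
-- Pre_ excludes exactly the inputs on which A raises KeyError: those containing a
-- character other than the two bracket characters (A's count dict has only those
-- two keys).
def Pre_solution (w : String) : Prop := w.toList.all (fun c => c == '(' || c == ')') = true
instance (w : String) : Decidable (Pre_solution w) := by unfold Pre_solution; infer_instance

def pvWitness_solution : String := "(()())(())"

def Spec_solution (w : String) (out : String) : Prop := out = solution_alt w
instance (w : String) (out : String) : Decidable (Spec_solution w out) := by unfold Spec_solution; infer_instance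

-- ===== CLAIM (what is proved, stated in full; the proofs are below) =====
def Claim_equal_solution : Prop := ∀ (w : String), Dom_solution w → Pre_solution w → Spec_solution w (solution w)

-- ===== LEMMAS AND PROOFS =====
def Brk (cs : List Char) : Prop := ∀ c ∈ cs, c = '(' ∨ c = ')'

theorem beq_sub_congr (a b c d : Int) (h : a - b = c - d) : (a == b) = (c == d) := by
  by_cases hz : a = b
  · rw [show (a == b) = true from beq_iff_eq.mpr hz,
      show (c == d) = true from beq_iff_eq.mpr (by omega)]
  · rw [show (a == b) = false from beq_eq_false_iff_ne.mpr hz,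
      show (c == d) = false from beq_eq_false_iff_ne.mpr (by omega)]

-- findSplit depends on the two counters only through their difference
theorem findSplit_diff (cs : List Char) (op cl op2 cl2 : Int)
    (h : op - cl = op2 - cl2) : findSplit cs op cl = findSplit cs op2 cl2 := by
  induction cs generalizing op cl op2 cl2 with
  | nil => rfl
  | cons c rest ih =>
    simp only [findSplit]
    have hd : (if c == '(' then op + 1 else op) - (if c == ')' then cl + 1 else cl)
            = (if c == '(' then op2 + 1 else op2) - (if c == ')' then cl2 + 1 else cl2) := by
      by_cases h1 : (c == '(') = true <;> by_cases h2 : (c == ')') = true <;>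
        simp [h1, h2] <;> omega
    rw [beq_sub_congr _ _ _ _ hd, ih _ _ _ _ hd]

-- findSplit only examines the prefix up to the index it returns
theorem findSplit_take (cs : List Char) (op cl : Int) (j : Nat)
    (h : findSplit cs op cl = some j) :
    findSplit (cs.take (j + 1)) op cl = some j := by
  induction cs generalizing op cl j with
  | nil => simp [findSplit] at h
  | cons c rest ih =>
    simp only [findSplit] at h
    by_cases ht : ((if c == '(' then op + 1 else op) == (if c == ')' then cl + 1 else cl)) = true
    · rw [if_pos ht] at h
      cases h
      simp only [List.take_succ_cons, List.take_zero, findSplit, if_pos ht]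
    · rw [if_neg ht] at h
      rcases Option.map_eq_some_iff.mp h with ⟨j', hj', rfl⟩
      rw [List.take_succ_cons]
      simp only [findSplit, if_neg ht, ih _ _ _ hj', Option.map_some]

-- B's chunk cutter performs exactly A's split, chunk after chunk
theorem chunksGo_split (cs : List Char) (buf : List Char) (op cl : Int) (hbrk : Brk cs) :
    chunksGo cs buf (op - cl) =
      (match findSplit cs op cl with
       | none => []
       | some j => (buf ++ cs.take (j + 1)) :: chunksGo (cs.drop (j + 1)) [] 0) := by
  induction cs generalizing buf op cl with
  | nil => rfl
  | cons c rest ih =>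
    have hbrk' : Brk rest := fun x hx => hbrk x (List.mem_cons_of_mem _ hx)
    rcases hbrk c List.mem_cons_self with rfl | rfl
    · simp only [chunksGo, findSplit]
      norm_num
      simp only [if_neg (show ¬('(' = ')') from by decide)]
      by_cases hz : (op + 1 : Int) = cl
      · rw [if_pos (show op - cl + 1 = 0 from by omega), if_pos hz]
        simp
      · rw [if_neg (show ¬(op - cl + 1 = 0) from by omega), if_neg hz]
        have := ih (buf ++ ['(']) (op + 1) cl hbrk'
        rw [show op + 1 - cl = op - cl + 1 from by ring] at this
        rw [this]
        rcases hfs : findSplit rest (op + 1) cl with _ | j' <;>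
          simp [hfs, List.append_assoc]
    · simp only [chunksGo, findSplit]
      norm_num
      simp only [if_neg (show ¬(')' = '(') from by decide)]
      by_cases hz : (op : Int) = cl + 1
      · rw [if_pos (show op - cl + -1 = 0 from by omega), if_pos hz]
        simp
      · rw [if_neg (show ¬(op - cl + -1 = 0) from by omega), if_neg hz]
        have := ih (buf ++ [')']) op (cl + 1) hbrk'
        rw [show op - (cl + 1) = op - cl + -1 from by ring] at this
        rw [this]
        rcases hfs : findSplit rest op (cl + 1) with _ | j' <;>
          simp [hfs, List.append_assoc]

theorem gbLoop_of_first_zero_at_end (cs : List Char) (n : Nat) (hbrk : Brk cs) (hn : 1 ≤ n)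
    (h : findSplit cs (n : Int) 0 = some (cs.length - 1)) :
    gbLoop (List.replicate n '(') cs = true := by
  induction cs generalizing n with
  | nil => simp [findSplit] at h
  | cons c rest ih =>
    have hbrk' : Brk rest := fun x hx => hbrk x (List.mem_cons_of_mem _ hx)
    have hne : (List.replicate n '(').isEmpty = false := by
      cases n with | zero => omega | succ m => simp [List.replicate_succ]
    rcases hbrk c List.mem_cons_self with rfl | rfl
    · -- c = '('
      simp only [findSplit] at h
      norm_num at h
      simp only [if_neg (show ¬('(' = ')') from by decide)] at h
      rw [if_neg (show ¬((n : Int) + 1 = 0) from by omega)] at h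
      rcases Option.map_eq_some_iff.mp h with ⟨j', hj', hj'e⟩
      have hlt := findSplit_lt _ _ _ _ hj'
      have hjl : j' = rest.length - 1 := by omega
      subst hjl
      have hcast : ((n : Int) + 1) = ((n + 1 : Nat) : Int) := by push_cast; ring
      rw [hcast] at hj'
      simp [gbLoop, hne]
      rw [← List.replicate_succ']
      exact ih (n + 1) hbrk' (by omega) hj'
    · -- c = ')'
      simp only [findSplit] at h
      norm_num at h
      simp only [if_neg (show ¬(')' = '(') from by decide)] at h
      by_cases hz : (n : Int) = 1
      · have hn1 : n = 1 := by omega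
        rw [if_pos hz] at h
        have hr : rest = [] := List.eq_nil_of_length_eq_zero (Option.some.inj h).symm
        subst hr; subst hn1
        simp [gbLoop, List.replicate]
      · rw [if_neg hz] at h
        rcases Option.map_eq_some_iff.mp h with ⟨j', hj', hj'e⟩
        have hlt := findSplit_lt _ _ _ _ hj'
        have hjl : j' = rest.length - 1 := by omega
        subst hjl
        rw [findSplit_diff rest _ _ ((n - 1 : Nat) : Int) 0 (by push_cast; omega)] at hj'
        simp [gbLoop, hne]
        exact ih (n - 1) hbrk' (by omega) hj'

-- A's correctness test on a minimal chunk is B's first-character test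
theorem good_take (cs : List Char) (j : Nat) (hbrk : Brk cs)
    (h : findSplit cs 0 0 = some j) :
    good_bracket (cs.take (j + 1)) = (cs.headD ' ' == '(') := by
  cases cs with
  | nil => simp [findSplit] at h
  | cons c rest =>
    rcases hbrk c List.mem_cons_self with rfl | rfl
    · -- head '(' : the chunk passes the stack check
      simp only [findSplit] at h
      norm_num at h
      rcases Option.map_eq_some_iff.mp h with ⟨j', hj', rfl⟩
      have hlt := findSplit_lt _ _ _ _ hj'
      have htake := findSplit_take _ _ _ _ hj'
      have hlen : (rest.take (j' + 1)).length = j' + 1 := by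
        simp [List.length_take]; omega
      simp only [List.take_succ_cons, good_bracket, gbLoop, List.headD_cons]
      norm_num
      have hgb : gbLoop (List.replicate 1 '(') (rest.take (j' + 1)) = true := by
        apply gbLoop_of_first_zero_at_end _ 1
          (fun x hx => hbrk x (List.mem_cons_of_mem _ (List.mem_of_mem_take hx)))
          (by omega)
        rw [hlen]
        simpa using htake
      simpa [List.replicate] using hgb
    · -- head ')' : the stack check fails immediately
      simp [List.take_succ_cons, good_bracket, gbLoop]

-- A's triple replace equals B's single swap map on bracket-only text
theorem flip_eq (s : List Char) (h : Brk s) : flipA s = flipB s := by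
  unfold flipA flipB
  rw [List.map_map, List.map_map]
  apply List.map_congr_left
  intro c hc
  rcases h c hc with rfl | rfl <;> rfl

theorem main_eq (n : Nat) : ∀ (cs : List Char), cs.length ≤ n → Brk cs →
    solAList cs = (chunksGo cs [] 0).foldr stepB [] := by
  induction n with
  | zero =>
    intro cs hl _
    have : cs = [] := List.eq_nil_of_length_eq_zero (by omega)
    subst this
    rw [solAList]
    rfl
  | succ n ih =>
    intro cs hl hbrk
    by_cases hE : cs = []
    · subst hE; rw [solAList]; rfl
    · have hEe : cs.isEmpty = false := by simpa [List.isEmpty_iff] using hE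
      have hch := chunksGo_split cs [] 0 0 hbrk
      norm_num at hch
      rw [solAList]
      simp only [hEe, Bool.false_eq_true, if_false]
      rcases hfs : findSplit cs 0 0 with _ | j
      · rw [hfs] at hch
        simp only [hch]
        have h0 : solAList [] = [] := by rw [solAList]; rfl
        simp [good_bracket, gbLoop, h0]
      · rw [hfs] at hch
        simp only [hch, List.nil_append, List.foldr_cons]
        have hlt := findSplit_lt _ _ _ _ hfs
        have hbrkv : Brk (cs.drop (j + 1)) :=
          fun x hx => hbrk x (List.mem_of_mem_drop hx)
        have hlen : (cs.drop (j + 1)).length ≤ n := by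
          simp only [List.length_drop]; omega
        have hIH := ih _ hlen hbrkv
        have hgood := good_take cs j hbrk hfs
        have hhead : (cs.take (j + 1)).headD ' ' = cs.headD ' ' := by
          cases cs with
          | nil => simp at hE
          | cons c r => simp [List.take_succ_cons]
        have hbrkint : Brk (((cs.take (j + 1)).drop 1).dropLast) := by
          intro x hx
          exact hbrk x (List.mem_of_mem_take
            (List.mem_of_mem_drop ((List.dropLast_sublist _).subset hx)))
        have hflip := flip_eq _ hbrkint
        simp only [stepB, ← hhead] at *
        by_cases hh : ((cs.take (j + 1)).headD ' ' == '(') = true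
        · simp only [hh, if_true, hgood, hIH]
        · simp only [hh, Bool.false_eq_true, if_false] at hgood ⊢
          simp only [hgood, Bool.false_eq_true, if_false, hIH, hflip]

-- ===== VERDICT (by name: the statement is the Claim_ definition above) =====
theorem solution_spec : Claim_equal_solution := by
  intro w _ hpre
  have hbrk : Brk w.toList := by
    intro c hc
    have h := List.all_eq_true.mp hpre c hc
    simpa using h
  unfold Spec_solution solution solution_alt
  rw [main_eq w.toList.length w.toList le_rfl hbrk]
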